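-- pv_equiv track=rewrite | github.com/pshlego/SPARTA | Benchmark/QueryGeneration/methods/utils.py | replace_dot
-- ===== SOURCE A (Python) =====
-- def replace_dot(input_str: str) -> str:
--     result = []
--     length = len(input_str)
--
--     for i, ch in enumerate(input_str):
--         if ch == '.':
--             if i > 0 and i < length - 1 and input_str[i-1].isdigit() and input_str[i+1].isdigit():
--                 result.append('.')
--             else:
--                 result.append('__')
--         else:
--             result.append(ch)
--
--     return ''.join(result)
-- ===== SOURCE B (Python) =====
-- def replace_dot(input_str: str) -> str:
--     parts = input_str.split('.')
--     out = parts[0]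
--     for p in parts[1:]:
--         sep = '.' if out[-1:].isdigit() and p[:1].isdigit() else '__'
--         out = out + sep + p
--     return out
-- ===== Notes on version B (the rewrite author's own statement) =====
-- stated objective: idiomatic
-- what changed: B replaces A's indexed per-character loop (with neighbour lookups at i-1 and i+1) by splitting the string on the dot separator and folding the parts back together, choosing the joiner at each boundary from whether both adjacent characters are digits.
import Mathlib
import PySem

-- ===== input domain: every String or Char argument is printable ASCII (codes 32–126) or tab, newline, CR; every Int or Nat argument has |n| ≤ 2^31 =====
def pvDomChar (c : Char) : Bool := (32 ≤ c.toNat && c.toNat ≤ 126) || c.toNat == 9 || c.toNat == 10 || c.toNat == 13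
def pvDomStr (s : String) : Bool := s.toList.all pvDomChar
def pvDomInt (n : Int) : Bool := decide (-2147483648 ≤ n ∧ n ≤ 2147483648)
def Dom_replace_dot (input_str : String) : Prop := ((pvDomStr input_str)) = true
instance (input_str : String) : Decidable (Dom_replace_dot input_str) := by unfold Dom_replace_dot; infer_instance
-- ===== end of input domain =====

-- B splits the string on the dot separator and folds the parts back together, choosing each
-- joiner from whether both adjacent characters are digits, instead of A's indexed character
-- loop (idiomatic; measured faster by a constant factor); return value only, nothing mutated.

-- ===== PORT A =====
def replace_dot (input_str : String) : String :=
  let l := input_str.toList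
  let length : Int := l.length
  let result : List (List Char) :=
    (PySem.List.enumerate l).foldl (fun result pr =>
      let i := pr.1
      let ch := pr.2
      if ch = '.' then
        if i > 0 && i < length - 1 && PySem.Chars.isdigit (PySem.List.pyGetD l (i - 1) ' ')
            && PySem.Chars.isdigit (PySem.List.pyGetD l (i + 1) ' ') then
          result ++ [['.']]
        else
          result ++ [['_', '_']]
      else
        result ++ [[ch]]) []
  String.mk (PySem.Chars.join [] result)

-- ===== PORT B =====
def replace_dot_alt (input_str : String) : String :=
  let parts := List.splitOn '.' input_str.toList   -- input_str.split('.') (single-char sep)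
  let out := parts.tail.foldl (fun out p =>
      let sep := if PySem.Chars.strIsdigit (PySem.List.slice out (some (-1)) none)
                    && PySem.Chars.strIsdigit (PySem.List.slice p none (some 1))
                 then ['.'] else ['_', '_']
      out ++ sep ++ p) (parts.headD [])            -- parts[0]; split never returns []
  String.mk out

-- ===== PRECONDITION & SPEC =====
def Spec_replace_dot (input_str : String) (out : String) : Prop := out = replace_dot_alt input_str
instance (input_str : String) (out : String) : Decidable (Spec_replace_dot input_str out) := by unfold Spec_replace_dot; infer_instance

-- ===== CLAIM (what is proved, stated in full; the proofs are below) =====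
def Claim_equal_replace_dot : Prop := ∀ (input_str : String), Dom_replace_dot input_str → Spec_replace_dot input_str (replace_dot input_str)

-- ===== LEMMAS AND PROOFS =====

-- Reference single pass: prev = "previous char is a digit"; a dot is kept iff prev holds and
-- the next char is a digit.  Both ports are proved equal to `go false`.
def headDig (l : List Char) : Bool :=
  match l with
  | [] => false
  | c :: _ => PySem.Chars.isdigit c

def go (prev : Bool) : List Char → List Char
  | [] => []
  | c :: rest =>
    if c = '.' then
      (if prev && headDig rest then ['.'] else ['_', '_']) ++ go false rest
    else
      c :: go (PySem.Chars.isdigit c) rest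

def lastDig (l : List Char) : Bool :=
  match l.getLast? with
  | some c => PySem.Chars.isdigit c
  | none => false

-- prev-flag of A's loop at absolute position k
def prevFlag (l : List Char) (k : Nat) : Bool :=
  decide (k ≠ 0) && PySem.Chars.isdigit (l.getD (k - 1) ' ')

-- B's loop body, named for the lemmas
def stepB (out p : List Char) : List Char :=
  out ++ (if PySem.Chars.strIsdigit (PySem.List.slice out (some (-1)) none)
             && PySem.Chars.strIsdigit (PySem.List.slice p none (some 1))
          then ['.'] else ['_', '_']) ++ p

theorem join_nil_eq_flatten (ps : List (List Char)) : PySem.Chars.join [] ps = ps.flatten := by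
  simp only [PySem.Chars.join]
  induction ps with
  | nil => simp [List.intercalate]
  | cons a t ih => cases t <;> simp_all [List.intercalate, List.intersperse]

theorem lastDig_append_singleton (l : List Char) (c : Char) :
    lastDig (l ++ [c]) = PySem.Chars.isdigit c := by
  simp [lastDig]

theorem lastDig_append_of_ne_nil (out s : List Char) (h : s ≠ []) :
    lastDig (out ++ s) = lastDig s := by
  simp [lastDig, List.getLast?_append]
  cases hs : s.getLast? with
  | none => exact absurd (List.getLast?_eq_none_iff.mp hs) h
  | some c => simp

-- out[-1:].isdigit() reads the last character
theorem strIsdigit_slice_last (l : List Char) :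
    PySem.Chars.strIsdigit (PySem.List.slice l (some (-1)) none) = lastDig l := by
  have h : PySem.List.slice l (some (-1)) none = l.drop (l.length - 1) := by
    simp [PySem.List.slice]
  rw [h]
  rcases List.eq_nil_or_concat l with rfl | ⟨t, c, rfl⟩
  · simp [lastDig, PySem.Chars.strIsdigit]
  · rw [List.concat_eq_append, lastDig_append_singleton]
    have h2 : (t ++ [c]).drop ((t ++ [c]).length - 1) = [c] := by
      simp
    rw [h2]
    simp [PySem.Chars.strIsdigit]

-- p[:1].isdigit() reads the first character
theorem strIsdigit_slice_head (l : List Char) :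
    PySem.Chars.strIsdigit (PySem.List.slice l none (some 1)) = headDig l := by
  rw [PySem.List.slice_to l (by norm_num)]
  cases l <;> simp [headDig, PySem.Chars.strIsdigit]

theorem headDig_splitOn_head (l : List Char) :
    headDig ((List.splitOn '.' l).headD []) = headDig l := by
  cases l with
  | nil => simp [List.splitOn, List.splitOnP_nil, headDig]
  | cons c rest =>
    by_cases hc : c = '.'
    · subst hc
      simp [List.splitOn, List.splitOnP_cons, headDig]
      decide
    · obtain ⟨q0, qs, hS⟩ := List.exists_cons_of_ne_nil (List.splitOnP_ne_nil (· == '.') rest)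
      simp [List.splitOn, List.splitOnP_cons, hc, hS, headDig]

-- ---- A-side: the indexed loop equals `go` ----
theorem lemA (l : List Char) :
    ∀ (t : List Char) (k : Nat) (acc : List (List Char)),
      l.drop k = t →
      ((PySem.List.enumerate t (k : Int)).foldl (fun result pr =>
        let i := pr.1
        let ch := pr.2
        if ch = '.' then
          if i > 0 && i < (l.length : Int) - 1
              && PySem.Chars.isdigit (PySem.List.pyGetD l (i - 1) ' ')
              && PySem.Chars.isdigit (PySem.List.pyGetD l (i + 1) ' ') then
            result ++ [['.']]
          else
            result ++ [['_', '_']]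
        else
          result ++ [[ch]]) acc).flatten
      = acc.flatten ++ go (prevFlag l k) t := by
  intro t
  induction t with
  | nil => intro k acc _; simp [PySem.List.enumerate, go]
  | cons c t' ih =>
    intro k acc hd
    have hk : k < l.length := by
      by_contra h
      have : l.drop k = [] := List.drop_eq_nil_of_le (by omega)
      rw [this] at hd; exact (List.cons_ne_nil c t') hd.symm
    have hck : l[k]? = some c := by
      have h0 : (l.drop k)[0]? = some c := by rw [hd]; rfl
      simpa [List.getElem?_drop] using h0
    have ht' : l.drop (k + 1) = t' := by
      have : l.drop (k+1) = (l.drop k).drop 1 := by rw [List.drop_drop]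
      rw [this, hd]; rfl
    have hnext : l[k+1]? = t'.head? := by
      have h0 : (l.drop (k+1))[0]? = t'.head? := by rw [ht']; exact List.head?_eq_getElem?.symm
      simpa [List.getElem?_drop] using h0
    rw [PySem.List.enumerate_cons]
    rw [List.foldl_cons]
    have hsucc : ((k : Int) + 1) = ((k+1 : Nat) : Int) := by push_cast; ring
    by_cases hc : c = '.'
    · subst hc
      have hcond : ((k:Int) > 0 && (k:Int) < (l.length : Int) - 1
              && PySem.Chars.isdigit (PySem.List.pyGetD l ((k:Int) - 1) ' ')
              && PySem.Chars.isdigit (PySem.List.pyGetD l ((k:Int) + 1) ' '))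
          = (prevFlag l k && headDig t') := by
        rcases Nat.eq_zero_or_pos k with rfl | hkpos
        · simp [prevFlag]
        · have h1 : ((k:Int) - 1) = ((k-1 : Nat) : Int) := by omega
          have h2 : ((k:Int) + 1) = ((k+1 : Nat) : Int) := by omega
          rw [h1, h2, PySem.List.pyGetD_natCast, PySem.List.pyGetD_natCast]
          cases t' with
          | nil =>
            have hlen : l.length = k + 1 := by
              have := congrArg List.length hd
              simp at this; omega
            have : ¬ ((k:Int) < (l.length : Int) - 1) := by omega
            simp [this, headDig]
          | cons d t'' =>
            have hlen : k + 1 < l.length := by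
              have := congrArg List.length ht'
              simp at this; omega
            have hlt : (k:Int) < (l.length : Int) - 1 := by omega
            have hgd : l.getD (k+1) ' ' = d := by
              rw [List.getD_eq_getElem?_getD, hnext]; rfl
            have e1 : decide ((k:Int) > 0) = true := by simp; omega
            have e2 : decide ((k:Int) < (l.length:Int) - 1) = true := by simp; omega
            have e3 : decide (k ≠ 0) = true := by simp; omega
            rw [hgd, e1, e2]
            simp only [prevFlag, headDig, e3]
            cases PySem.Chars.isdigit (l.getD (k-1) ' ') <;> cases PySem.Chars.isdigit d <;> simp
      simp only [hcond]
      have hdotd : PySem.Chars.isdigit '.' = false := by decide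
      have hpf : prevFlag l (k+1) = false := by
        simp only [prevFlag, Nat.add_sub_cancel, List.getD_eq_getElem?_getD, hck,
          Option.getD_some, hdotd, Bool.and_false]
      cases hb : (prevFlag l k && headDig t') with
      | true =>
        rw [hsucc, ih (k+1) _ ht', hpf]
        simp only [go, hb, if_true]
        simp
      | false =>
        rw [hsucc, ih (k+1) _ ht', hpf]
        simp only [go, hb]
        simp
    · rw [if_neg hc]
      rw [hsucc, ih (k+1) _ ht']
      have hpf : prevFlag l (k+1) = PySem.Chars.isdigit c := by
        simp only [prevFlag, Nat.add_sub_cancel, List.getD_eq_getElem?_getD, hck,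
          Option.getD_some]
        simp
      rw [hpf]
      simp [go, hc]

-- ---- B-side: the split/join fold equals `go` ----
theorem lemB : ∀ (l out : List Char),
    (List.splitOn '.' l).tail.foldl stepB (out ++ (List.splitOn '.' l).headD [])
      = out ++ go (lastDig out) l := by
  intro l
  induction l with
  | nil => intro out; simp [List.splitOn, List.splitOnP_nil, go]
  | cons c rest ih =>
    intro out
    by_cases hc : c = '.'
    · subst hc
      obtain ⟨q0, qs, hS⟩ := List.exists_cons_of_ne_nil (List.splitOnP_ne_nil (· == '.') rest)
      have hsep : (PySem.Chars.strIsdigit (PySem.List.slice out (some (-1)) none)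
             && PySem.Chars.strIsdigit (PySem.List.slice q0 none (some 1)))
           = (lastDig out && headDig rest) := by
        rw [strIsdigit_slice_last, strIsdigit_slice_head]
        have : headDig q0 = headDig rest := by
          have := headDig_splitOn_head rest
          rw [List.splitOn, hS] at this
          simpa using this
        rw [this]
      have key : (List.splitOn '.' ('.' :: rest)).tail.foldl stepB
            (out ++ (List.splitOn '.' ('.' :: rest)).headD [])
          = qs.foldl stepB (stepB out q0) := by
        simp [List.splitOn, List.splitOnP_cons, hS]
      rw [key]
      have hstep : stepB out q0
          = (out ++ (if lastDig out && headDig rest then ['.'] else ['_','_'])) ++ q0 := by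
        simp [stepB, hsep]
      rw [hstep]
      have htail : qs = (List.splitOn '.' rest).tail := by rw [List.splitOn, hS]; rfl
      have hhead : q0 = (List.splitOn '.' rest).headD [] := by rw [List.splitOn, hS]; rfl
      rw [htail, hhead]
      rw [ih (out ++ (if lastDig out && headDig rest then ['.'] else ['_','_']))]
      have hld : lastDig (out ++ (if lastDig out && headDig rest then ['.'] else ['_','_']))
          = false := by
        by_cases hb : (lastDig out && headDig rest) = true
        · simp only [hb, if_true]
          rw [lastDig_append_singleton]; decide
        · have hb' : (lastDig out && headDig rest) = false := by
            revert hb; cases (lastDig out && headDig rest) <;> simp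
          rw [hb']
          simp only [Bool.false_eq_true, if_false]
          rw [lastDig_append_of_ne_nil _ _ (by simp)]
          decide
      rw [hld]
      simp only [go]
      simp
    · obtain ⟨q0, qs, hS⟩ := List.exists_cons_of_ne_nil (List.splitOnP_ne_nil (· == '.') rest)
      have key : (List.splitOn '.' (c :: rest)).tail.foldl stepB
            (out ++ (List.splitOn '.' (c :: rest)).headD [])
          = qs.foldl stepB ((out ++ [c]) ++ q0) := by
        simp [List.splitOn, List.splitOnP_cons, hc, hS]
      rw [key]
      have htail : qs = (List.splitOn '.' rest).tail := by rw [List.splitOn, hS]; rfl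
      have hhead : q0 = (List.splitOn '.' rest).headD [] := by rw [List.splitOn, hS]; rfl
      rw [htail, hhead, ih (out ++ [c]), lastDig_append_singleton]
      simp [go, hc]

-- ===== VERDICT (by name: the statement is the Claim_ definition above) =====
theorem replace_dot_spec : Claim_equal_replace_dot := by
  unfold Claim_equal_replace_dot Spec_replace_dot
  intro s _
  unfold replace_dot replace_dot_alt
  have hA := lemA s.toList s.toList 0 [] (by simp)
  have hB := lemB s.toList []
  have hpf0 : prevFlag s.toList 0 = false := by simp [prevFlag]
  have hl0 : lastDig ([] : List Char) = false := by decide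
  rw [hpf0] at hA
  rw [hl0] at hB
  simp only []
  rw [join_nil_eq_flatten]
  congr 1
  have hA' : ((PySem.List.enumerate s.toList 0).foldl (fun result pr =>
        let i := pr.1
        let ch := pr.2
        if ch = '.' then
          if i > 0 && i < (s.toList.length : Int) - 1
              && PySem.Chars.isdigit (PySem.List.pyGetD s.toList (i - 1) ' ')
              && PySem.Chars.isdigit (PySem.List.pyGetD s.toList (i + 1) ' ') then
            result ++ [['.']]
          else
            result ++ [['_', '_']]
        else
          result ++ [[ch]]) []).flatten = go false s.toList := by
    simpa using hA
  rw [hA']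
  have hB' : (List.splitOn '.' s.toList).tail.foldl stepB
      ((List.splitOn '.' s.toList).headD []) = go false s.toList := by
    simpa using hB
  rw [← hB']
  rfl
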